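-- pv_equiv track=rewrite | github.com/irhel/Programming-Languages | pset1_nfsmaccepts.py | nfsmaccepts
-- ===== SOURCE A (Python) =====
-- def nfsmaccepts(current, edges, accepting, visited):
--         if current in accepting:
--                 return ""
--         if current in visited:
--                 return None
--         else:
--                 possible_transitions = []
--                 for edge in edges:
--                         if edge[0] == current:
--                                 for p in edges[edge]:
--                                         res = nfsmaccepts(p, edges, accepting, visited + [current])
--                                         if res != None:
--                                                 return edge[1] + res
-- ===== SOURCE B (Python) =====
-- def nfsmaccepts(current, edges, accepting, visited):
--     # Iterative DFS with an explicit stack of (state, path_visited, accumulated_string) frames.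
--     stack = [(current, visited, "")]
--     while stack:
--         state, seen, acc = stack.pop()
--         if state in accepting:
--             return acc
--         if state in seen:
--             continue
--         children = []
--         for edge in edges:
--             if edge[0] == state:
--                 for p in edges[edge]:
--                     children.append((p, seen + [state], acc + edge[1]))
--         stack.extend(reversed(children))
--     return None
-- ===== Notes on version B (the rewrite author's own statement) =====
-- stated objective: alternative
-- what changed: Replaces A's recursive DFS (recursion + early returns, prepending the edge label to each recursive result) by an iterative DFS over an explicit stack of (state, path-visited, accumulated-label-string) frames, pushed in reverse so the first branch is explored first.
import Mathlib
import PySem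

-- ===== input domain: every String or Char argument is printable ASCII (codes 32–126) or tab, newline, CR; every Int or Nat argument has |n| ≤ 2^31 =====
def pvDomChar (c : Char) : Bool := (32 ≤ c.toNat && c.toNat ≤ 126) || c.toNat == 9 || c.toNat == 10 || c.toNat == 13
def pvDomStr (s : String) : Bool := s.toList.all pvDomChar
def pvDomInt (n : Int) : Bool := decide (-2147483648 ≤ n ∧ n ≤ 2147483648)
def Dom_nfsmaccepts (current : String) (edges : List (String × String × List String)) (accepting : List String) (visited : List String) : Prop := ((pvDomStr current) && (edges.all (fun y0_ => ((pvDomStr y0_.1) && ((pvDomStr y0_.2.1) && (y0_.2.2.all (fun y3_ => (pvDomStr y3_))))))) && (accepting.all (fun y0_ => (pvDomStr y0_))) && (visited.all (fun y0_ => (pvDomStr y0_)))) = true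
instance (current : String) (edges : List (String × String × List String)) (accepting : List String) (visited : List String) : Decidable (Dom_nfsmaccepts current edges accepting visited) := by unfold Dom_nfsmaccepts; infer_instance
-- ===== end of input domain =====

-- B replaces A's recursive DFS by an iterative DFS over an explicit stack of
-- (state, path-visited, accumulated-label-string) frames (alternative decomposition, same cost).

-- ===== PORT A =====
-- inner loop: 'for p in edges[edge]: res = …; if res != None: return edge[1] + res'
def nfsmTryDests (rec : String → Option String) (label : String) : List String → Option String
  | [] => none
  | p :: ps =>
    match rec p with
    | some res => some (label ++ res)
    | none => nfsmTryDests rec label ps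

-- outer loop: 'for edge in edges: if edge[0] == current: …' (falls through to the next edge)
def nfsmTryEdges (rec : String → Option String) (current : String) : List (String × String × List String) → Option String
  | [] => none
  | (src, label, dests) :: es =>
    if src = current then
      match nfsmTryDests rec label dests with
      | some r => some r
      | none => nfsmTryEdges rec current es
    else nfsmTryEdges rec current es

-- A's recursion, made total with a fuel counter; the fuel edges.length + 1 is never
-- exhausted, since the recursion depth is bounded by the number of distinct edge sources
-- (proved below via nfsmRun_fuel: the result is fuel-independent above that bound)
def nfsmRun (edges : List (String × String × List String)) (accepting : List String) : Nat → String → List String → Option String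
  | 0, _, _ => none
  | fuel + 1, current, visited =>
    if current ∈ accepting then some ""
    else if current ∈ visited then none
    else nfsmTryEdges (fun p => nfsmRun edges accepting fuel p (visited ++ [current])) current edges

def nfsmaccepts (current : String) (edges : List (String × String × List String)) (accepting : List String) (visited : List String) : Option String :=
  nfsmRun edges accepting (edges.length + 1) current visited

-- ===== PORT B =====
-- total number of listed destinations (used only to size B's loop fuel)
def nfsmD (edges : List (String × String × List String)) : Nat :=
  (edges.map (fun e => e.2.2.length)).sum

-- 'children' list of Source B, in discovery order; Source B pushes reversed(children) onto a
-- top-at-end Python stack, i.e. prepends children in order to a top-at-head list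
def nfsmChildren (edges : List (String × String × List String)) (state : String) (seen : List String) (acc : String) : List (String × List String × String) :=
  edges.flatMap (fun e => if e.1 = state then e.2.2.map (fun p => (p, seen ++ [state], acc ++ e.2.1)) else [])

-- Source B's while-loop; fuel bounds the number of pops and is chosen large enough to never
-- run out (proved below via nfsmRunB_eq_flatten), so the 'fuel = 0' branch is unreachable
def nfsmRunB (edges : List (String × String × List String)) (accepting : List String) : Nat → List (String × List String × String) → Option String
  | 0, _ => none
  | _ + 1, [] => none
  | fuel + 1, (state, seen, acc) :: rest =>
    if state ∈ accepting then some acc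
    else if state ∈ seen then nfsmRunB edges accepting fuel rest
    else nfsmRunB edges accepting fuel (nfsmChildren edges state seen acc ++ rest)

def nfsmaccepts_alt (current : String) (edges : List (String × String × List String)) (accepting : List String) (visited : List String) : Option String :=
  nfsmRunB edges accepting ((nfsmD edges + 1) ^ (edges.length + 1)) [(current, visited, "")]

-- ===== PRECONDITION & SPEC =====
-- Pre_ excludes association lists whose (source, label) keys repeat: 'edges' is a Python
-- dict keyed by (source, label), so duplicate keys cannot reach A (the dict collapses them);
-- on such lists the assoc-list model does not represent any dict input of A.
def Pre_nfsmaccepts (current : String) (edges : List (String × String × List String)) (accepting : List String) (visited : List String) : Prop :=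
  (edges.map (fun e => (e.1, e.2.1))).Nodup

instance (current : String) (edges : List (String × String × List String)) (accepting : List String) (visited : List String) : Decidable (Pre_nfsmaccepts current edges accepting visited) := by unfold Pre_nfsmaccepts; infer_instance

def pvWitness_nfsmaccepts : String × (List (String × String × List String)) × List String × List String :=
  ("a", [("a", "x", ["b"])], ["b"], [])

def Spec_nfsmaccepts (current : String) (edges : List (String × String × List String)) (accepting : List String) (visited : List String) (out : Option String) : Prop := out = nfsmaccepts_alt current edges accepting visited
instance (current : String) (edges : List (String × String × List String)) (accepting : List String) (visited : List String) (out : Option String) : Decidable (Spec_nfsmaccepts current edges accepting visited out) := by unfold Spec_nfsmaccepts; infer_instance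

-- ===== CLAIM (what is proved, stated in full; the proofs are below) =====
def Claim_equal_nfsmaccepts : Prop := ∀ (current : String) (edges : List (String × String × List String)) (accepting : List String) (visited : List String), Dom_nfsmaccepts current edges accepting visited → Pre_nfsmaccepts current edges accepting visited → Spec_nfsmaccepts current edges accepting visited (nfsmaccepts current edges accepting visited)

-- ===== LEMMAS AND PROOFS =====

-- number of edge sources not yet on the visited path (bounds A's recursion depth)
def nfsmM (edges : List (String × String × List String)) (vis : List String) : Nat :=
  ((edges.map (fun e => e.1)).toFinset \ vis.toFinset).card

-- potential of a stack (bounds the number of pops B's loop still performs)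
def nfsmPhi (edges : List (String × String × List String)) : List (String × List String × String) → Nat
  | [] => 0
  | (_, seen, _) :: rest => (nfsmD edges + 1) ^ nfsmM edges seen + nfsmPhi edges rest

-- A's recursion at its canonical (always sufficient) fuel
def nfsmAOpt (edges : List (String × String × List String)) (accepting : List String) (s : String) (seen : List String) : Option String :=
  nfsmRun edges accepting (nfsmM edges seen + 1) s seen

-- what B's machine computes from a stack, expressed through A's recursion
def nfsmFlatten (edges : List (String × String × List String)) (accepting : List String) : List (String × List String × String) → Option String
  | [] => none
  | (s, seen, acc) :: rest =>
    match nfsmAOpt edges accepting s seen with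
    | some r => some (acc ++ r)
    | none => nfsmFlatten edges accepting rest

lemma nfsmTryDests_congr {rec rec' : String → Option String} {label : String} {ds : List String}
    (h : ∀ p ∈ ds, rec p = rec' p) :
    nfsmTryDests rec label ds = nfsmTryDests rec' label ds := by
  induction ds with
  | nil => rfl
  | cons p ps ih =>
    simp only [nfsmTryDests, h p (List.mem_cons_self ..)]
    cases rec' p with
    | some r => rfl
    | none => exact ih fun q hq => h q (List.mem_cons_of_mem _ hq)

lemma nfsmTryEdges_congr {rec rec' : String → Option String} {c : String}
    {es : List (String × String × List String)}
    (h : ∀ e ∈ es, e.1 = c → ∀ p ∈ e.2.2, rec p = rec' p) :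
    nfsmTryEdges rec c es = nfsmTryEdges rec' c es := by
  induction es with
  | nil => rfl
  | cons e es ih =>
    obtain ⟨src, label, dests⟩ := e
    simp only [nfsmTryEdges]
    by_cases hs : src = c
    · simp only [hs]
      rw [nfsmTryDests_congr (fun p hp => h _ (List.mem_cons_self ..) hs p hp)]
      cases nfsmTryDests rec' label dests with
      | some r => rfl
      | none => exact ih fun e he h1 => h e (List.mem_cons_of_mem _ he) h1
    · simp only [if_neg hs]
      exact ih fun e he h1 => h e (List.mem_cons_of_mem _ he) h1

lemma nfsmM_lt {edges : List (String × String × List String)} {c : String} {vis : List String}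
    (hc : c ∈ edges.map (fun e => e.1)) (hv : c ∉ vis) :
    nfsmM edges (vis ++ [c]) < nfsmM edges vis := by
  unfold nfsmM
  apply Finset.card_lt_card
  rw [Finset.ssubset_def]
  constructor
  · apply Finset.sdiff_subset_sdiff (Finset.Subset.refl _)
    intro x hx
    simp only [List.toFinset_append, List.mem_toFinset] at hx ⊢
    simp [hx]
  · intro hsub
    have hmem : c ∈ (edges.map (fun e => e.1)).toFinset \ vis.toFinset := by
      simp [List.mem_toFinset, hc, hv]
    have := hsub hmem
    simp [List.toFinset_append] at this

lemma nfsmM_pos {edges : List (String × String × List String)} {c : String} {vis : List String}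
    (hc : c ∈ edges.map (fun e => e.1)) (hv : c ∉ vis) : 0 < nfsmM edges vis := by
  unfold nfsmM
  apply Finset.card_pos.mpr
  exact ⟨c, by simp [List.mem_toFinset, hc, hv]⟩

-- fuel irrelevance for A's recursion
lemma nfsmRun_fuel (edges : List (String × String × List String)) (accepting : List String) :
    ∀ (n : Nat) (c : String) (vis : List String) (f f' : Nat), nfsmM edges vis ≤ n →
      n < f → n < f' →
      nfsmRun edges accepting f c vis = nfsmRun edges accepting f' c vis := by
  intro n
  induction n using Nat.strong_induction_on with
  | _ n IH =>
    intro c vis f f' hm hf hf'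
    obtain ⟨g, rfl⟩ : ∃ g, f = g + 1 := ⟨f - 1, by omega⟩
    obtain ⟨g', rfl⟩ : ∃ g', f' = g' + 1 := ⟨f' - 1, by omega⟩
    simp only [nfsmRun]
    split_ifs with h1 h2
    · rfl
    · rfl
    · apply nfsmTryEdges_congr
      intro e he hec p _
      have hc : c ∈ edges.map (fun e => e.1) := List.mem_map.mpr ⟨e, he, hec⟩
      have hlt : nfsmM edges (vis ++ [c]) < nfsmM edges vis := nfsmM_lt hc h2
      exact IH (nfsmM edges (vis ++ [c])) (by omega) p (vis ++ [c]) g g' (le_refl _) (by omega) (by omega)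

lemma nfsmPhi_append (edges : List (String × String × List String))
    (xs ys : List (String × List String × String)) :
    nfsmPhi edges (xs ++ ys) = nfsmPhi edges xs + nfsmPhi edges ys := by
  induction xs with
  | nil => simp [nfsmPhi]
  | cons x xs ih => obtain ⟨s, seen, acc⟩ := x; simp [nfsmPhi, ih]; omega

lemma nfsmChildren_len (edges : List (String × String × List String)) (s : String)
    (seen : List String) (acc : String) :
    (nfsmChildren edges s seen acc).length ≤ nfsmD edges := by
  unfold nfsmChildren nfsmD
  rw [List.length_flatMap]
  apply List.sum_le_sum
  intro e _
  split_ifs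
  · simp
  · simp

lemma nfsmChildren_mem {edges : List (String × String × List String)} {s : String}
    {seen : List String} {acc : String} {fr : String × List String × String}
    (h : fr ∈ nfsmChildren edges s seen acc) :
    fr.2.1 = seen ++ [s] ∧ s ∈ edges.map (fun e => e.1) := by
  unfold nfsmChildren at h
  rw [List.mem_flatMap] at h
  obtain ⟨e, he, hfr⟩ := h
  by_cases hs : e.1 = s
  · rw [if_pos hs, List.mem_map] at hfr
    obtain ⟨p, _, rfl⟩ := hfr
    exact ⟨rfl, List.mem_map.mpr ⟨e, he, hs⟩⟩
  · simp [hs] at hfr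

lemma nfsmPhi_const (edges : List (String × String × List String)) (seen' : List String) :
    ∀ frames : List (String × List String × String), (∀ fr ∈ frames, fr.2.1 = seen') →
      nfsmPhi edges frames = frames.length * (nfsmD edges + 1) ^ nfsmM edges seen' := by
  intro frames
  induction frames with
  | nil => simp [nfsmPhi]
  | cons fr frames ih =>
    intro h
    obtain ⟨a, b, c⟩ := fr
    have hb : b = seen' := h _ (List.mem_cons_self ..)
    simp only [nfsmPhi, hb, ih fun fr hfr => h fr (List.mem_cons_of_mem _ hfr), List.length_cons]
    ring

lemma nfsmPhi_children_succ (edges : List (String × String × List String)) {s : String}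
    {seen : List String} (acc : String) (hs : s ∉ seen) :
    nfsmPhi edges (nfsmChildren edges s seen acc) + 1 ≤ (nfsmD edges + 1) ^ nfsmM edges seen := by
  by_cases hc : nfsmChildren edges s seen acc = []
  · simp only [hc, nfsmPhi]
    simpa using Nat.one_le_pow _ _ (by omega)
  · obtain ⟨fr, hmem⟩ := List.exists_mem_of_ne_nil _ hc
    have hsrc : s ∈ edges.map (fun e => e.1) := (nfsmChildren_mem hmem).2
    have hm1 : 0 < nfsmM edges seen := nfsmM_pos hsrc hs
    have hmlt : nfsmM edges (seen ++ [s]) < nfsmM edges seen := nfsmM_lt hsrc hs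
    have hconst : nfsmPhi edges (nfsmChildren edges s seen acc)
        = (nfsmChildren edges s seen acc).length * (nfsmD edges + 1) ^ nfsmM edges (seen ++ [s]) :=
      nfsmPhi_const edges (seen ++ [s]) _ (fun fr hfr => (nfsmChildren_mem hfr).1)
    set D := nfsmD edges with hD
    set m := nfsmM edges seen with hm
    have hlen : (nfsmChildren edges s seen acc).length ≤ D := nfsmChildren_len edges s seen acc
    have hpow : (D + 1) ^ nfsmM edges (seen ++ [s]) ≤ (D + 1) ^ (m - 1) :=
      Nat.pow_le_pow_right (by omega) (by omega)
    have h1 : (1 : Nat) ≤ (D + 1) ^ (m - 1) := Nat.one_le_pow _ _ (by omega)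
    have hmul : (nfsmChildren edges s seen acc).length * (D + 1) ^ nfsmM edges (seen ++ [s])
        ≤ D * (D + 1) ^ (m - 1) := Nat.mul_le_mul hlen hpow
    have hmeq : (D + 1) ^ m = D * (D + 1) ^ (m - 1) + (D + 1) ^ (m - 1) := by
      conv_lhs => rw [show m = (m - 1) + 1 by omega]
      rw [pow_succ]
      ring
    rw [hconst]
    omega

-- the dest-level correspondence between B's frames and A's inner loop
lemma nfsmFlatten_dests (edges : List (String × String × List String)) (accepting : List String)
    (s label acc : String) (seen : List String) :
    ∀ (ds : List String) (tail : List (String × List String × String)),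
      nfsmFlatten edges accepting (ds.map (fun p => (p, seen ++ [s], acc ++ label)) ++ tail)
        = match nfsmTryDests (fun p => nfsmAOpt edges accepting p (seen ++ [s])) label ds with
          | some r => some (acc ++ r)
          | none => nfsmFlatten edges accepting tail := by
  intro ds
  induction ds with
  | nil => intro tail; rfl
  | cons p ps ih =>
    intro tail
    simp only [List.map_cons, List.cons_append, nfsmFlatten, nfsmTryDests]
    cases h : nfsmAOpt edges accepting p (seen ++ [s]) with
    | some r => simp [String.append_assoc]
    | none => exact ih tail

-- the edge-level correspondence between B's children block and A's outer loop
lemma nfsmFlatten_children (edges : List (String × String × List String)) (accepting : List String)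
    (s acc : String) (seen : List String) :
    ∀ (es : List (String × String × List String)) (tail : List (String × List String × String)),
      nfsmFlatten edges accepting
          ((es.flatMap (fun e => if e.1 = s then e.2.2.map (fun p => (p, seen ++ [s], acc ++ e.2.1)) else [])) ++ tail)
        = match nfsmTryEdges (fun p => nfsmAOpt edges accepting p (seen ++ [s])) s es with
          | some r => some (acc ++ r)
          | none => nfsmFlatten edges accepting tail := by
  intro es
  induction es with
  | nil => intro tail; rfl
  | cons e es ih =>
    intro tail
    obtain ⟨src, lab, dests⟩ := e
    simp only [List.flatMap_cons, nfsmTryEdges]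
    by_cases hs : src = s
    · subst hs
      rw [if_pos rfl, if_pos rfl, List.append_assoc, nfsmFlatten_dests]
      cases nfsmTryDests (fun p => nfsmAOpt edges accepting p (seen ++ [src])) lab dests with
      | some r => rfl
      | none => exact ih tail
    · simp only [if_neg hs, List.nil_append]
      exact ih tail

-- B's machine computes nfsmFlatten whenever the fuel covers the stack's potential
lemma nfsmRunB_eq_flatten (edges : List (String × String × List String)) (accepting : List String) :
    ∀ (f : Nat) (stack : List (String × List String × String)), nfsmPhi edges stack ≤ f →
      nfsmRunB edges accepting f stack = nfsmFlatten edges accepting stack := by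
  intro f
  induction f with
  | zero =>
    intro stack h
    rcases stack with _ | ⟨⟨s, seen, acc⟩, rest⟩
    · rfl
    · exfalso
      have : (1 : Nat) ≤ (nfsmD edges + 1) ^ nfsmM edges seen := Nat.one_le_pow _ _ (by omega)
      simp only [nfsmPhi] at h; omega
  | succ g IH =>
    intro stack h
    rcases stack with _ | ⟨⟨s, seen, acc⟩, rest⟩
    · rfl
    · have hone : (1 : Nat) ≤ (nfsmD edges + 1) ^ nfsmM edges seen := Nat.one_le_pow _ _ (by omega)
      simp only [nfsmPhi] at h
      simp only [nfsmRunB, nfsmFlatten]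
      split_ifs with h1 h2
      · -- accepting: A returns "" at canonical fuel
        have : nfsmAOpt edges accepting s seen = some "" := by
          unfold nfsmAOpt nfsmRun
          simp [h1]
        simp [this]
      · -- already on the path: A returns none
        have : nfsmAOpt edges accepting s seen = none := by
          unfold nfsmAOpt nfsmRun
          simp [h1, h2]
        rw [this]
        exact IH rest (by omega)
      · -- expand
        have hA : nfsmAOpt edges accepting s seen
            = nfsmTryEdges (fun p => nfsmAOpt edges accepting p (seen ++ [s])) s edges := by
          unfold nfsmAOpt
          conv_lhs => rw [nfsmRun]
          simp only [if_neg h1, if_neg h2]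
          apply nfsmTryEdges_congr
          intro e he hec p _
          have hc : s ∈ edges.map (fun e => e.1) := List.mem_map.mpr ⟨e, he, hec⟩
          have hlt : nfsmM edges (seen ++ [s]) < nfsmM edges seen := nfsmM_lt hc h2
          exact nfsmRun_fuel edges accepting (nfsmM edges (seen ++ [s])) p (seen ++ [s]) _ _
            (le_refl _) (by omega) (by omega)
        have hphi : nfsmPhi edges (nfsmChildren edges s seen acc ++ rest) ≤ g := by
          rw [nfsmPhi_append]
          have := nfsmPhi_children_succ edges acc h2
          omega
        rw [IH _ hphi, hA]
        exact nfsmFlatten_children edges accepting s acc seen edges rest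

lemma nfsmM_le_len (edges : List (String × String × List String)) (vis : List String) :
    nfsmM edges vis ≤ edges.length := by
  unfold nfsmM
  calc ((edges.map (fun e => e.1)).toFinset \ vis.toFinset).card
      ≤ (edges.map (fun e => e.1)).toFinset.card := Finset.card_le_card (Finset.sdiff_subset)
    _ ≤ (edges.map (fun e => e.1)).length := List.toFinset_card_le _
    _ = edges.length := List.length_map ..

-- ===== VERDICT (by name: the statement is the Claim_ definition above) =====
theorem nfsmaccepts_spec : Claim_equal_nfsmaccepts := by
  intro current edges accepting visited _ _
  show nfsmaccepts current edges accepting visited = nfsmaccepts_alt current edges accepting visited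
  unfold nfsmaccepts nfsmaccepts_alt
  have hphi : nfsmPhi edges [(current, visited, "")] ≤ (nfsmD edges + 1) ^ (edges.length + 1) := by
    simp only [nfsmPhi]
    have := Nat.pow_le_pow_right (n := nfsmD edges + 1) (by omega)
      (show nfsmM edges visited ≤ edges.length + 1 by have := nfsmM_le_len edges visited; omega)
    omega
  rw [nfsmRunB_eq_flatten edges accepting _ _ hphi]
  have hA : nfsmRun edges accepting (edges.length + 1) current visited
      = nfsmAOpt edges accepting current visited := by
    apply nfsmRun_fuel edges accepting (nfsmM edges visited) current visited _ _ (le_refl _)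
    · have := nfsmM_le_len edges visited; omega
    · omega
  rw [hA]
  cases h : nfsmAOpt edges accepting current visited with
  | some r => simp [nfsmFlatten, h]
  | none => simp [nfsmFlatten, h]
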